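-- pv_equiv track=rewrite | github.com/M705-bit/beecrowd | 1123.py | RegistraRotas
-- ===== SOURCE A (Python) =====
-- def bubble_sort(arr):
--     swapped = True
--     while swapped:
--         swapped = False
--         for i in range(len(arr) - 1):
--             if arr[i] > arr[i + 1]:
--                 arr[i], arr[i + 1] = arr[i + 1], arr[i]
--                 swapped = True
--     return arr  # Retorna a lista ordenada
--
-- def RegistraRotas(N, M, C, K, estrada):
--     pedagio = []
--     rota = 0
--     for i in range(len(estrada)):
--         if estrada[i][0] == K:
--             pedagio.append(estrada[i][2])  # Adiciona um novo pedágio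
--             j = 0
--             while j < len(estrada) and estrada[j][1] != C - 1:
--                 if estrada[j][0] == estrada[i][1]:
--                     pedagio[rota] += estrada[j][2]
--                     i = j
--                 j += 1
--             rota += 1
--
--     if pedagio:  # Evita erro caso a lista esteja vazia
--         pedagio = bubble_sort(pedagio)
--         return pedagio[0]
--     return None  # Retorna None se não houver rota válida
-- ===== SOURCE B (Python) =====
-- # B: compute the stop-prefix once, follow each start edge's toll chain over that
-- # prefix, and take the minimum with min() -- no bubble sort, no index re-scanning.
-- def RegistraRotas(N, M, C, K, estrada):
--     prefix = []
--     for r in estrada: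
--         if r[1] == C - 1:
--             break
--         prefix.append(r)
--     costs = []
--     for r in estrada:
--         if r[0] == K:
--             cost, cur = r[2], r[1]
--             for e in prefix:
--                 if e[0] == cur:
--                     cost += e[2]
--                     cur = e[1]
--             costs.append(cost)
--     return min(costs) if costs else None
-- ===== Notes on version B (the rewrite author's own statement) =====
-- stated objective: simpler
-- what changed: B computes the stop-prefix (rows before the first with r[1]==C-1) once, walks each start edge's toll chain over that prefix, and returns min(costs), instead of A's per-edge index-juggling rescans of estrada and bubble-sorting the toll list to take its head.
-- outside the precondition, e.g. on RegistraRotas(1, 1, 3, 5, [[1]]): A returns None, B raises IndexError; on RegistraRotas(1, 1, 3, 5, [[1, 2]]): A returns None, B returns None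
import Mathlib
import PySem

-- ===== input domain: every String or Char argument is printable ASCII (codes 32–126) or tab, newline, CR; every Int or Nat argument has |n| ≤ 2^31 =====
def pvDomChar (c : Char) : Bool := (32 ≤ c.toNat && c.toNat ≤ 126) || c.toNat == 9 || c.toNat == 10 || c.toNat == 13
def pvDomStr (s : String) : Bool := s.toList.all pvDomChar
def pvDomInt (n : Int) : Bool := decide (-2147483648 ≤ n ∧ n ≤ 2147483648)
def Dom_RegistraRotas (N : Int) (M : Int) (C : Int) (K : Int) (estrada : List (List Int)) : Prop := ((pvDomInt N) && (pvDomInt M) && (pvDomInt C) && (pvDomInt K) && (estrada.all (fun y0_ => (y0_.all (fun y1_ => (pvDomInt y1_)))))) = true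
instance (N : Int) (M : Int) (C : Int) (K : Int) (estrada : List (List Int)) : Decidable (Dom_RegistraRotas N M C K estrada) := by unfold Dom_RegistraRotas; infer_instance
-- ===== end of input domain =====

-- B replaces A's index-chasing rescans and bubble sort by a once-computed stop prefix,
-- a chain walk over it per start edge, and min(); objective: simpler.

-- ===== PORT A =====
-- estrada[i][k] (valid indices only under Pre_; default 0 / [] where Python would raise)
def pvGetE (estrada : List (List Int)) (i : Int) (k : Int) : Int :=
  PySem.List.pyGetD (PySem.List.pyGetD estrada i []) k 0

-- one pass of A's inner 'for i in range(len(arr)-1)' with adjacent swaps; Bool = swapped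
def pvPass : List Int → List Int × Bool
  | [] => ([], false)
  | [x] => ([x], false)
  | x :: y :: t =>
    if x > y then
      (y :: (pvPass (x :: t)).1, true)
    else
      (x :: (pvPass (y :: t)).1, (pvPass (y :: t)).2)
termination_by l => l.length
decreasing_by all_goals simp

-- inversion count: totality fuel for A's 'while swapped' loop (pvInv l + 1 passes suffice)
def pvInv : List Int → Nat
  | [] => 0
  | x :: t => t.countP (fun y => y < x) + pvInv t

-- A's 'while swapped' loop (fuel-guarded for totality)
def pvBubble : Nat → List Int → List Int
  | 0, arr => arr
  | k + 1, arr =>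
    let p := pvPass arr
    if p.2 then pvBubble k p.1 else p.1

-- A's inner 'while j < len(estrada) and estrada[j][1] != C-1' over state (acc = pedagio[rota], i)
def pvInner (estrada : List (List Int)) (C : Int) (j : Nat) (acc : Int) (i : Int) : Int × Int :=
  if j < estrada.length then
    if pvGetE estrada j 1 = C - 1 then (acc, i)
    else if pvGetE estrada j 0 = pvGetE estrada i 1 then
      pvInner estrada C (j + 1) (acc + pvGetE estrada j 2) (j : Int)
    else pvInner estrada C (j + 1) acc i
  else (acc, i)
termination_by estrada.length - j

-- A's outer 'for i in range(len(estrada))' building pedagio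
def pvOuter (estrada : List (List Int)) (C : Int) (K : Int) (i : Nat) (pedagio : List Int) : List Int :=
  if i < estrada.length then
    if pvGetE estrada i 0 = K then
      pvOuter estrada C K (i + 1)
        (pedagio ++ [(pvInner estrada C 0 (pvGetE estrada i 2) (i : Int)).1])
    else pvOuter estrada C K (i + 1) pedagio
  else pedagio
termination_by estrada.length - i

def RegistraRotas (N : Int) (M : Int) (C : Int) (K : Int) (estrada : List (List Int)) : Option Int :=
  let pedagio := pvOuter estrada C K 0 []
  if pedagio ≠ [] then
    PySem.List.pyGet? (pvBubble (pvInv pedagio + 1) pedagio) 0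
  else none

-- ===== PORT B =====
-- r[k] (valid k only under Pre_; default 0 where Python would raise)
def pvGetR (r : List Int) (k : Int) : Int := PySem.List.pyGetD r k 0

-- B's first loop: rows before the first one with r[1] == C-1
def pvPrefix (C : Int) : List (List Int) → List (List Int)
  | [] => []
  | r :: t => if pvGetR r 1 = C - 1 then [] else r :: pvPrefix C t

-- B's chain walk over the prefix with state (cost, cur)
def pvChain : List (List Int) → Int → Int → Int
  | [], cost, _ => cost
  | e :: t, cost, cur =>
    if pvGetR e 0 = cur then pvChain t (cost + pvGetR e 2) (pvGetR e 1)
    else pvChain t cost cur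

def RegistraRotas_alt (N : Int) (M : Int) (C : Int) (K : Int) (estrada : List (List Int)) : Option Int :=
  let pre := pvPrefix C estrada
  let costs := estrada.foldl
    (fun acc r => if pvGetR r 0 = K then acc ++ [pvChain pre (pvGetR r 2) (pvGetR r 1)] else acc) []
  PySem.List.min? costs (fun x => x)

-- ===== PRECONDITION & SPEC =====
-- Pre_ restricts to the natural domain: every row is a full (origin, dest, toll) record
-- of at least 3 fields. On shorter rows Python A raises IndexError wherever it indexes
-- them, and where a short row escapes A's indexing (A returns None for lack of a start
-- edge) B's own prefix scan either raises or agrees (see claim.json cites). The ports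
-- use a 0/[] default there, so the equality proof below happens to hold unconditionally.
def Pre_RegistraRotas (N : Int) (M : Int) (C : Int) (K : Int) (estrada : List (List Int)) : Prop :=
  ∀ r ∈ estrada, 3 ≤ r.length
instance (N : Int) (M : Int) (C : Int) (K : Int) (estrada : List (List Int)) : Decidable (Pre_RegistraRotas N M C K estrada) := by unfold Pre_RegistraRotas; infer_instance

def pvWitness_RegistraRotas : Int × Int × Int × Int × List (List Int) :=
  (6, 4, 3, 0, [[0, 1, 10], [1, 2, 10]])

def Spec_RegistraRotas (N : Int) (M : Int) (C : Int) (K : Int) (estrada : List (List Int)) (out : Option Int) : Prop := out = RegistraRotas_alt N M C K estrada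
instance (N : Int) (M : Int) (C : Int) (K : Int) (estrada : List (List Int)) (out : Option Int) : Decidable (Spec_RegistraRotas N M C K estrada out) := by unfold Spec_RegistraRotas; infer_instance

-- ===== CLAIM (what is proved, stated in full; the proofs are below) =====
def Claim_equal_RegistraRotas : Prop := ∀ (N : Int) (M : Int) (C : Int) (K : Int) (estrada : List (List Int)), Dom_RegistraRotas N M C K estrada → Pre_RegistraRotas N M C K estrada → Spec_RegistraRotas N M C K estrada (RegistraRotas N M C K estrada)

-- ===== LEMMAS AND PROOFS =====

lemma pvGetE_valid (estrada : List (List Int)) (j : Nat) (h : j < estrada.length) (k : Int) :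
    pvGetE estrada (j : Int) k = pvGetR estrada[j] k := by
  simp [pvGetE, pvGetR, PySem.List.pyGetD_natCast, List.getElem?_eq_getElem h]

lemma pvInner_eq (estrada : List (List Int)) (C : Int) :
    ∀ (j : Nat) (acc : Int) (i : Int),
      (pvInner estrada C j acc i).1 =
        pvChain (pvPrefix C (estrada.drop j)) acc (pvGetE estrada i 1) := by
  intro j
  induction hn : estrada.length - j using Nat.strong_induction_on generalizing j with
  | _ n ih =>
    intro acc i
    rw [pvInner]
    by_cases hj : j < estrada.length
    · rw [if_pos hj, List.drop_eq_getElem_cons hj, pvPrefix,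
        pvGetE_valid estrada j hj 0, pvGetE_valid estrada j hj 1, pvGetE_valid estrada j hj 2]
      by_cases hstop : pvGetR estrada[j] 1 = C - 1
      · rw [if_pos hstop, if_pos hstop]
        simp [pvChain]
      · rw [if_neg hstop, if_neg hstop]
        have hrec : estrada.length - (j + 1) < n := by omega
        by_cases hm : pvGetR estrada[j] 0 = pvGetE estrada i 1
        · rw [if_pos hm, ih _ hrec (j + 1) rfl, pvGetE_valid estrada j hj 1]
          simp only [pvChain]
          rw [if_pos hm]
        · rw [if_neg hm, ih _ hrec (j + 1) rfl]
          simp only [pvChain]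
          rw [if_neg hm]
    · rw [if_neg hj, List.drop_of_length_le (by omega), pvPrefix, pvChain]

lemma pvOuter_eq (estrada : List (List Int)) (C K : Int) :
    ∀ (i : Nat) (p : List Int),
      pvOuter estrada C K i p =
        (estrada.drop i).foldl
          (fun acc r => if pvGetR r 0 = K then
              acc ++ [pvChain (pvPrefix C estrada) (pvGetR r 2) (pvGetR r 1)]
            else acc) p := by
  intro i
  induction hn : estrada.length - i using Nat.strong_induction_on generalizing i with
  | _ n ih =>
    intro p
    rw [pvOuter]
    by_cases hi : i < estrada.length
    · have hrec : estrada.length - (i + 1) < n := by omega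
      rw [if_pos hi, List.drop_eq_getElem_cons hi, pvGetE_valid estrada i hi 0]
      simp only [List.foldl_cons]
      by_cases hk : pvGetR estrada[i] 0 = K
      · rw [if_pos hk, if_pos hk, ih _ hrec (i + 1) rfl,
          pvInner_eq estrada C 0 (pvGetE estrada (i : Int) 2) (i : Int), List.drop_zero,
          pvGetE_valid estrada i hi 2, pvGetE_valid estrada i hi 1]
      · rw [if_neg hk, if_neg hk, ih _ hrec (i + 1) rfl]
    · rw [if_neg hi, List.drop_of_length_le (by omega), List.foldl_nil]

lemma pvPass_perm (l : List Int) : (pvPass l).1.Perm l := by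
  induction l using pvPass.induct with
  | case1 => simp [pvPass]
  | case2 x => simp [pvPass]
  | case3 x y t h ih =>
    rw [pvPass, if_pos h]
    exact (ih.cons y).trans (List.Perm.swap x y t)
  | case4 x y t h ih =>
    rw [pvPass, if_neg h]
    exact ih.cons x

lemma pvPass_false (l : List Int) (h : (pvPass l).2 = false) : (pvPass l).1 = l := by
  induction l using pvPass.induct with
  | case1 => simp [pvPass]
  | case2 x => simp [pvPass]
  | case3 x y t hgt ih => rw [pvPass, if_pos hgt] at h; simp at h
  | case4 x y t hgt ih =>
    rw [pvPass, if_neg hgt] at h ⊢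
    dsimp only at h ⊢
    rw [ih h]

lemma pvPass_false_chain (l : List Int) (h : (pvPass l).2 = false) :
    l.IsChain (· ≤ ·) := by
  induction l using pvPass.induct with
  | case1 => simp
  | case2 x => simp
  | case3 x y t hgt ih => rw [pvPass, if_pos hgt] at h; simp at h
  | case4 x y t hgt ih =>
    rw [pvPass, if_neg hgt] at h
    dsimp only at h
    exact List.isChain_cons_cons.mpr ⟨by omega, ih h⟩

lemma pvPass_true_inv (l : List Int) (h : (pvPass l).2 = true) :
    pvInv (pvPass l).1 < pvInv l := by
  induction l using pvPass.induct with
  | case1 => simp [pvPass] at h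
  | case2 x => simp [pvPass] at h
  | case3 x y t hgt ih =>
    rw [pvPass, if_pos hgt]
    dsimp only
    have hcnt : (pvPass (x :: t)).1.countP (fun z => z < y) =
        (x :: t).countP (fun z => z < y) := (pvPass_perm _).countP_eq _
    have hle : pvInv (pvPass (x :: t)).1 ≤ t.countP (fun z => z < x) + pvInv t := by
      by_cases hs : (pvPass (x :: t)).2 = true
      · have := ih hs
        rw [pvInv] at this; omega
      · rw [pvPass_false _ (by simpa using hs), pvInv]
    rw [pvInv, pvInv, pvInv, hcnt, List.countP_cons, List.countP_cons]
    have hxy : ¬ (x < y) := by omega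
    have hyx : y < x := hgt
    simp only [hxy, hyx, decide_true, decide_false, if_true, if_false,
      Bool.false_eq_true]
    omega
  | case4 x y t hgt ih =>
    rw [pvPass, if_neg hgt] at h ⊢
    dsimp only at h ⊢
    have := ih h
    have hcnt : (pvPass (y :: t)).1.countP (fun z => z < x) =
        (y :: t).countP (fun z => z < x) := (pvPass_perm _).countP_eq _
    rw [pvInv, pvInv, hcnt]
    omega

lemma pvBubble_spec : ∀ (n : Nat) (l : List Int), pvInv l < n →
    (pvBubble n l).Perm l ∧ (pvBubble n l).IsChain (· ≤ ·) := by
  intro n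
  induction n with
  | zero => intro l h; omega
  | succ k ih =>
    intro l h
    rw [pvBubble]
    by_cases hs : (pvPass l).2 = true
    · simp only [hs, if_true]
      have hlt : pvInv (pvPass l).1 < k := by
        have := pvPass_true_inv l hs; omega
      obtain ⟨hp, hc⟩ := ih _ hlt
      exact ⟨hp.trans (pvPass_perm l), hc⟩
    · simp only [hs, if_false, Bool.false_eq_true]
      rw [pvPass_false _ (by simpa using hs)]
      exact ⟨List.Perm.refl l, pvPass_false_chain _ (by simpa using hs)⟩

lemma pvSorted_head_min (l m : List Int) (hperm : l.Perm m) (hchain : l.IsChain (· ≤ ·))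
    (hne : m ≠ []) : PySem.List.pyGet? l 0 = PySem.List.min? m (fun x => x) := by
  have hlne : l ≠ [] := fun h => hne (List.Perm.nil_eq (h ▸ hperm)).symm
  obtain ⟨h, t, rfl⟩ := List.exists_cons_of_ne_nil hlne
  obtain ⟨mmin, hm⟩ : ∃ v, PySem.List.min? m (fun x => x) = some v := by
    cases hmm : PySem.List.min? m (fun x => x) with
    | none => exact absurd ((PySem.List.min?_eq_none_iff m (fun x => x)).mp hmm) hne
    | some v => exact ⟨v, rfl⟩
  rw [hm, PySem.List.pyGet?_zero_cons]
  have hpair : (h :: t).Pairwise (· ≤ ·) := hchain.pairwise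
  have hhle : ∀ y ∈ h :: t, h ≤ y := by
    intro y hy
    rcases hy with _ | hy
    · exact le_refl h
    · exact List.rel_of_pairwise_cons hpair (by assumption)
  have hmem : h ∈ m := hperm.mem_iff.mp (List.mem_cons_self)
  have hminmem : mmin ∈ m := PySem.List.min?_mem hm
  have h1 : h ≤ mmin := hhle mmin (hperm.mem_iff.mpr hminmem)
  have h2 : mmin ≤ h := PySem.List.min?_isMin hm h hmem
  exact congrArg some (by omega)

lemma RegistraRotas_eq (N M C K : Int) (estrada : List (List Int)) :
    RegistraRotas N M C K estrada = RegistraRotas_alt N M C K estrada := by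
  unfold RegistraRotas RegistraRotas_alt
  have houter := pvOuter_eq estrada C K 0 []
  rw [List.drop_zero] at houter
  simp only [houter]
  set costs := estrada.foldl
    (fun acc r => if pvGetR r 0 = K then
        acc ++ [pvChain (pvPrefix C estrada) (pvGetR r 2) (pvGetR r 1)]
      else acc) [] with hcosts
  by_cases hne : costs = []
  · rw [hne]
    rfl
  · rw [if_pos hne]
    obtain ⟨hp, hc⟩ := pvBubble_spec (pvInv costs + 1) costs (by omega)
    exact pvSorted_head_min _ _ hp hc hne

-- ===== VERDICT (by name: the statement is the Claim_ definition above) =====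
theorem RegistraRotas_spec : Claim_equal_RegistraRotas := by
  intro N M C K estrada _ _
  unfold Spec_RegistraRotas
  exact RegistraRotas_eq N M C K estrada
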